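-- pv_equiv track=rewrite | github.com/Desilo/liberate-fhe | src/liberate/fhe/context/ckks_context.py | psi_bank
-- ===== SOURCE A (Python) =====
-- def primitive_root_2N(q, N):
--     _2N = 2 * N
--     K = (q - 1) // _2N
--     for x in range(2, N):
--         g = pow(x, K, q)
--         h = pow(g, N, q)
--         if h != 1:
--             break
--     return g
--
-- def psi_power_series(psi, N, q):
--     series = [1]
--     for i in range(N - 1):
--         series.append(series[-1] * psi % q)
--     return series
--
-- def psi_bank(q, logN):
--     N = 2 ** logN
--     psi = [primitive_root_2N(qi, N) for qi in q]
--     ipsi = [pow(psii, -1, qi) for psii, qi in zip(psi, q)]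
--     psi_series = [psi_power_series(psii, N, qi) for psii, qi in zip(psi, q)]
--     ipsi_series = [
--         psi_power_series(ipsii, N, qi) for ipsii, qi in zip(ipsi, q)
--     ]
--     return psi_series, ipsi_series
-- ===== SOURCE B (Python) =====
-- def primitive_root_2N(q, N):
--     K = (q - 1) // (2 * N)
--     x = next((x for x in range(2, N) if pow(x, K * N, q) != 1), N - 1)
--     return pow(x, K, q)
--
-- def psi_power_series(psi, N, q):
--     return [1] + [pow(psi, i, q) for i in range(1, N)]
--
-- def psi_bank(q, logN):
--     N = 2 ** logN
--     psi_series, ipsi_series = [], []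
--     for qi in q:
--         psi = primitive_root_2N(qi, N)
--         ipsi = pow(psi, -1, qi)
--         psi_series.append(psi_power_series(psi, N, qi))
--         ipsi_series.append(psi_power_series(ipsi, N, qi))
--     return psi_series, ipsi_series
-- ===== Notes on version B (the rewrite author's own statement) =====
-- stated objective: idiomatic
-- what changed: B computes each series term independently by closed-form modular exponentiation (pow(psi, i, q)) instead of threading a running product, fuses the four comprehensions into one loop over q, and replaces the break-out root search with a direct find-first-candidate (next over a generator) followed by a single pow.
import Mathlib
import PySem

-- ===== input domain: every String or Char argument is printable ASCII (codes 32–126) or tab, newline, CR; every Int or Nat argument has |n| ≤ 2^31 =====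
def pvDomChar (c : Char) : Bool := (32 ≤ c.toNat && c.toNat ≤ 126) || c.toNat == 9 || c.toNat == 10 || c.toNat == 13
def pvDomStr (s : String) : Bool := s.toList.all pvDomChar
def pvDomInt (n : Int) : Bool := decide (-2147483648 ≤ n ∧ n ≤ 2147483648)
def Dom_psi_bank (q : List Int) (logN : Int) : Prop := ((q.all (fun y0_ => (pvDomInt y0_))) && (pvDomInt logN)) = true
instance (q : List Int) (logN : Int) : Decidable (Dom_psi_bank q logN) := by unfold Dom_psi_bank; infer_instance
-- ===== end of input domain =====

-- B replaces A's accumulator-threaded power series with closed-form modular exponentiation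
-- per index and A's break-out root search with a direct find-first-candidate; objective: idiomatic.

-- Shared rendering of Python's pow with modulus (both sources call the same builtin):
-- pow(a, -1, m): modular inverse via the extended Euclid coefficient, reduced with Python's mod.
-- Exact whenever the inverse exists (non-invertible bases raise in Python and lie outside Pre_).
def pyInvMod (a m : Int) : Int :=
  PySem.Int.mod (Nat.gcdA (a % (m.natAbs : Int)).toNat m.natAbs) m

-- pow(b, e, m) for any int exponent: negative exponents invert the base first (as CPython does).
def pyPowMod (b e m : Int) : Int :=
  if 0 ≤ e then PySem.Int.powMod b e.toNat m
  else PySem.Int.powMod (pyInvMod b m) e.natAbs m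

-- ===== PORT A =====
-- the 'for x in range(2, N): … if h != 1: break' loop of primitive_root_2N; g is the loop carry
def rootLoopA (q K N : Int) : List Int → Int → Int
  | [], g => g
  | x :: xs, _ =>
    let g := pyPowMod x K q
    let h := pyPowMod g N q
    if h ≠ 1 then g else rootLoopA q K N xs g

def primitiveRoot2NA (q N : Int) : Int :=
  let K := PySem.Int.floordiv (q - 1) (2 * N)
  rootLoopA q K N (PySem.List.pyRange 2 N 1) 0

-- series[-1] is rendered as getLastD 0: series starts as [1] and only grows, so it is never empty
def psiPowerSeriesA (psi N q : Int) : List Int :=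
  (PySem.List.pyRange 0 (N - 1) 1).foldl
    (fun series _ => series ++ [PySem.Int.mod (series.getLastD 0 * psi) q]) [1]

def psi_bank (q : List Int) (logN : Int) : List (List Int) × List (List Int) :=
  let N : Int := 2 ^ logN.toNat
  let psi := q.map (fun qi => primitiveRoot2NA qi N)
  let ipsi := (psi.zip q).map (fun pq => pyPowMod pq.1 (-1) pq.2)
  let psiSeries := (psi.zip q).map (fun pq => psiPowerSeriesA pq.1 N pq.2)
  let ipsiSeries := (ipsi.zip q).map (fun pq => psiPowerSeriesA pq.1 N pq.2)
  (psiSeries, ipsiSeries)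

-- ===== PORT B =====
def primitiveRoot2N_alt (q N : Int) : Int :=
  let K := PySem.Int.floordiv (q - 1) (2 * N)
  let x := ((PySem.List.pyRange 2 N 1).find? (fun x => pyPowMod x (K * N) q != 1)).getD (N - 1)
  pyPowMod x K q

def psiPowerSeries_alt (psi N q : Int) : List Int :=
  1 :: (PySem.List.pyRange 1 N 1).map (fun i => pyPowMod psi i q)

def psi_bank_alt (q : List Int) (logN : Int) : List (List Int) × List (List Int) :=
  let N : Int := 2 ^ logN.toNat
  q.foldl
    (fun acc qi =>
      let psi := primitiveRoot2N_alt qi N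
      let ipsi := pyPowMod psi (-1) qi
      (acc.1 ++ [psiPowerSeries_alt psi N qi], acc.2 ++ [psiPowerSeries_alt ipsi N qi]))
    ([], [])

-- ===== PRECONDITION & SPEC =====
-- Pre_ keeps the inputs on which the Python A returns: a nonempty q needs logN ≥ 2 (otherwise the
-- root loop never runs and g is unbound), and each modulus must make every pow succeed: positive
-- qi that are either at most 2N (zero exponent), coprime to every candidate base 2..N-1, or odd
-- with base 2 already a witness; or odd negative qi (their root search always stops at base 2, a
-- unit). Pre_ is slightly narrower than A's exact non-raising set: for composite qi > 2N whether
-- A raises at the inversion depends on where the break falls, which is not a closed-form shape.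
def Pre_psi_bank (q : List Int) (logN : Int) : Prop :=
  (q = [] ∨ 2 ≤ logN) ∧
  ∀ qi ∈ q,
    (1 ≤ qi ∧
      (qi ≤ 2 * 2 ^ logN.toNat ∨
       (∀ x ∈ PySem.List.pyRange 2 (2 ^ logN.toNat) 1, Int.gcd x qi = 1) ∨
       (qi % 2 = 1 ∧
        PySem.Int.powMod 2
          ((PySem.Int.floordiv (qi - 1) (2 * 2 ^ logN.toNat) * 2 ^ logN.toNat).toNat) qi ≠ 1)))
    ∨ (qi < 0 ∧ qi % 2 ≠ 0)
instance (q : List Int) (logN : Int) : Decidable (Pre_psi_bank q logN) := by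
  unfold Pre_psi_bank; infer_instance

def pvWitness_psi_bank : List Int × Int := ([5, 17], 2)

def Spec_psi_bank (q : List Int) (logN : Int) (out : List (List Int) × List (List Int)) : Prop :=
  out = psi_bank_alt q logN
instance (q : List Int) (logN : Int) (out : List (List Int) × List (List Int)) :
    Decidable (Spec_psi_bank q logN out) := by unfold Spec_psi_bank; infer_instance

-- ===== CLAIM (what is proved, stated in full; the proofs are below) =====
def Claim_equal_psi_bank : Prop :=
  ∀ (q : List Int) (logN : Int), Dom_psi_bank q logN → Pre_psi_bank q logN →
    Spec_psi_bank q logN (psi_bank q logN)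

-- ===== LEMMAS AND PROOFS =====

theorem fmod_congr {a c : Int} (b : Int) (h : a % b = c % b) : a.fmod b = c.fmod b := by
  rw [Int.fmod_eq_emod, Int.fmod_eq_emod, h]
  have hd : b ∣ a ↔ b ∣ c := by
    constructor <;> intro hx
    · exact Int.dvd_of_emod_eq_zero (by rw [← h]; exact Int.emod_eq_zero_of_dvd hx)
    · exact Int.dvd_of_emod_eq_zero (by rw [h]; exact Int.emod_eq_zero_of_dvd hx)
  simp only [hd]

theorem fmod_emod (a b : Int) : a.fmod b % b = a % b := by
  rw [Int.fmod_eq_emod]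
  split
  · simp
  · have h := Int.add_mul_emod_self_left (a := a % b) (b := b) (c := 1)
    rw [mul_one, Int.emod_emod_of_dvd _ dvd_rfl] at h
    exact h

theorem powMod_powMod (b : Int) (k n : Nat) (q : Int) :
    PySem.Int.powMod (PySem.Int.powMod b k q) n q = PySem.Int.powMod b (k * n) q := by
  unfold PySem.Int.powMod PySem.Int.mod
  apply fmod_congr
  have h : ((b ^ k).fmod q) ≡ b ^ k [ZMOD q] := fmod_emod _ _
  calc ((b ^ k).fmod q) ^ n % q = (b ^ k) ^ n % q := h.pow n
    _ = b ^ (k * n) % q := by rw [← pow_mul]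

theorem pyPow_comp (x K : Int) {N : Int} (hN : 0 < N) (q : Int) :
    pyPowMod (pyPowMod x K q) N q = pyPowMod x (K * N) q := by
  by_cases hK : 0 ≤ K
  · have h1 : 0 ≤ K * N := mul_nonneg hK hN.le
    simp only [pyPowMod, if_pos hK, if_pos hN.le, if_pos h1]
    rw [powMod_powMod, Int.toNat_mul hK hN.le]
  · rw [not_le] at hK
    have h1 : K * N < 0 := mul_neg_of_neg_of_pos hK hN
    simp only [pyPowMod, if_neg (by omega : ¬ (0:Int) ≤ K), if_pos hN.le,
      if_neg (by omega : ¬ (0:Int) ≤ K * N)]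
    rw [powMod_powMod]
    congr 1
    have hm : (K * N).natAbs = K.natAbs * N.natAbs := Int.natAbs_mul K N
    have hn : N.natAbs = N.toNat := by omega
    rw [hm, hn]

theorem rootLoopA_eq (q K N : Int) (hN : 0 < N) :
    ∀ (xs : List Int) (x g0 : Int),
      rootLoopA q K N (x :: xs) g0 =
        pyPowMod ((List.find? (fun y => pyPowMod y (K * N) q != 1) (x :: xs)).getD
          ((x :: xs).getLastD 0)) K q := by
  intro xs
  induction xs with
  | nil =>
    intro x g0
    have hx : (List.find? (fun y => pyPowMod y (K * N) q != 1) [x]).getD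
        (([x] : List Int).getLastD 0) = x := by
      cases hp : (pyPowMod x (K * N) q != 1) <;> simp [List.find?, hp]
    rw [hx]
    simp only [rootLoopA]
    split <;> rfl
  | cons x' xs ih =>
    intro x g0
    by_cases hx : pyPowMod (pyPowMod x K q) N q ≠ 1
    · have hb : (pyPowMod x (K * N) q != 1) = true := by
        rw [← pyPow_comp x K hN q]; simpa using hx
      rw [List.find?_cons_of_pos (p := fun y => pyPowMod y (K * N) q != 1) hb]
      conv_lhs => rw [rootLoopA]
      simp only [Option.getD_some]
      exact if_pos hx
    · have hb : ¬ ((pyPowMod x (K * N) q != 1) = true) := by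
        rw [← pyPow_comp x K hN q]; simpa using hx
      rw [List.find?_cons_of_neg (p := fun y => pyPowMod y (K * N) q != 1) hb]
      conv_lhs => rw [rootLoopA]
      show (if pyPowMod (pyPowMod x K q) N q ≠ 1 then pyPowMod x K q
        else rootLoopA q K N (x' :: xs) (pyPowMod x K q)) = _
      rw [if_neg hx, ih x' (pyPowMod x K q)]
      simp

theorem pyRange_getLastD {N : Int} (hN : 2 < N) :
    (PySem.List.pyRange 2 N 1).getLastD 0 = N - 1 := by
  have h2 : (2:Int) ≤ N - 1 := by omega
  have hsplit : PySem.List.pyRange 2 N 1 = PySem.List.pyRange 2 (N - 1) 1 ++ [N - 1] := by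
    conv_lhs => rw [show N = (N - 1) + 1 by ring]
    exact PySem.List.pyRange_one_succ_right h2
  rw [hsplit]
  simp

theorem primRoot_eq (q : Int) {N : Int} (hN : 2 < N) :
    primitiveRoot2NA q N = primitiveRoot2N_alt q N := by
  unfold primitiveRoot2NA primitiveRoot2N_alt
  have h0 : (0:Int) < N := by omega
  have hcons : PySem.List.pyRange 2 N 1 = 2 :: PySem.List.pyRange 3 N 1 := by
    have := PySem.List.pyRange_one_cons hN
    simpa [show (2:Int) + 1 = 3 by ring] using this
  dsimp only
  rw [← pyRange_getLastD hN, hcons]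
  exact rootLoopA_eq q _ N h0 _ 2 0

theorem step_pow (psi q : Int) (i : Nat) :
    PySem.Int.mod (PySem.Int.powMod psi i q * psi) q = PySem.Int.powMod psi (i + 1) q := by
  unfold PySem.Int.powMod PySem.Int.mod
  apply fmod_congr
  have h : ((psi ^ i).fmod q) ≡ psi ^ i [ZMOD q] := fmod_emod _ _
  calc ((psi ^ i).fmod q) * psi % q = psi ^ i * psi % q := h.mul_right psi
    _ = psi ^ (i + 1) % q := by rw [← pow_succ]

theorem foldl_const {α β : Type} (F : β → β) (l : List α) (init : β) :
    l.foldl (fun s _ => F s) init = F^[l.length] init := by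
  induction l generalizing init with
  | nil => rfl
  | cons a l ih => simp [List.foldl_cons, ih, Function.iterate_succ_apply]

theorem iter_inv (psi q : Int) (n : Nat) :
    (fun s => s ++ [PySem.Int.mod (s.getLastD 0 * psi) q])^[n] [1] =
      1 :: (List.range' 1 n).map (fun i => PySem.Int.powMod psi i q) := by
  induction n with
  | zero => simp
  | succ n ih =>
    rw [Function.iterate_succ_apply', ih, List.range'_concat]
    cases n with
    | zero =>
      simp [PySem.Int.powMod, PySem.Int.mod, pow_one]
    | succ m =>
      have hgen : ∀ (L : List Int) (a : Int), ((1:Int) :: (L ++ [a])).getLastD 0 = a := by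
        intro L a
        rw [show ((1:Int) :: (L ++ [a])) = (((1:Int) :: L) ++ [a]) from rfl, List.getLastD_concat]
      have hlast : ((1:Int) :: (List.range' 1 (m + 1)).map
          (fun i => PySem.Int.powMod psi i q)).getLastD 0 = PySem.Int.powMod psi (m + 1) q := by
        rw [List.range'_concat, List.map_append, List.map_cons, List.map_nil, one_mul,
          Nat.add_comm 1 m, hgen]
      rw [hlast, step_pow]
      simp [List.range'_concat, Nat.add_comm]

theorem pyRange_zero_length (m : Int) : (PySem.List.pyRange 0 m 1).length = m.toNat := by
  rw [PySem.List.pyRange_of_pos _ _ one_pos]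
  simp only [List.length_map, List.length_range]
  split_ifs <;> omega

theorem pyRange_one_from_one (N : Int) :
    PySem.List.pyRange 1 N 1 = (List.range (N - 1).toNat).map (fun k : Nat => 1 + (k : Int)) := by
  rw [PySem.List.pyRange_of_pos _ _ one_pos]
  have hc : (if (1:Int) < N then ((N - 1 + 1 - 1) / 1).toNat else 0) = (N - 1).toNat := by
    split_ifs <;> omega
  rw [hc]
  apply List.map_congr_left
  intro k _
  ring

theorem seriesA_eq_alt (psi N q : Int) :
    psiPowerSeriesA psi N q = psiPowerSeries_alt psi N q := by
  unfold psiPowerSeriesA psiPowerSeries_alt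
  rw [foldl_const, pyRange_zero_length, iter_inv, pyRange_one_from_one]
  congr 1
  rw [List.range'_eq_map_range, List.map_map, List.map_map]
  apply List.map_congr_left
  intro k _
  simp only [Function.comp, pyPowMod, if_pos (by omega : (0:Int) ≤ 1 + (k : Int))]
  rw [show ((1:Int) + (k : Int)).toNat = 1 + k by omega]

theorem foldl_pairs (f g : Int → List Int) :
    ∀ (l : List Int) (acc : List (List Int) × List (List Int)),
      l.foldl (fun acc qi => (acc.1 ++ [f qi], acc.2 ++ [g qi])) acc =
        (acc.1 ++ l.map f, acc.2 ++ l.map g) := by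
  intro l
  induction l with
  | nil => intro acc; simp
  | cons a l ih => intro acc; simp [ih]

theorem zip_map_self (r : Int → Int) :
    ∀ (l : List Int), (l.map r).zip l = l.map (fun x => (r x, x)) := by
  intro l; induction l with
  | nil => rfl
  | cons a l ih => simp [ih]

-- ===== VERDICT (by name: the statement is the Claim_ definition above) =====
theorem psi_bank_spec : Claim_equal_psi_bank := by
  intro q logN _hdom hpre
  unfold Spec_psi_bank psi_bank psi_bank_alt
  rcases hpre.1 with hq | hl
  · subst hq; rfl
  · have hN : (2:Int) < 2 ^ logN.toNat := by
      have h2 : 2 ≤ logN.toNat := by omega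
      have h4 : (4:Nat) ≤ 2 ^ logN.toNat := by
        calc (4:Nat) = 2 ^ 2 := by norm_num
          _ ≤ 2 ^ logN.toNat := Nat.pow_le_pow_right (by norm_num) h2
      have : ((2:Nat) ^ logN.toNat : Int) = (2:Int) ^ logN.toNat := by push_cast; ring
      omega
    dsimp only
    rw [foldl_pairs, zip_map_self, List.map_map, List.map_map, zip_map_self, List.map_map]
    simp only [List.nil_append]
    rw [Prod.mk.injEq]
    refine ⟨?_, ?_⟩
    all_goals
      apply List.map_congr_left
      intro qi _
      simp only [Function.comp_apply]
      rw [primRoot_eq qi hN, seriesA_eq_alt]
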